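-- pv_equiv track=rewrite | github.com/25ASAB015/nvim | scripts/update_keybindings.py | format_key_combination
-- ===== SOURCE A (Python) =====
-- def format_key_combination(key: str) -> str:
--     """Formatea las combinaciones de teclas para mostrar."""
--     # Reemplazar notaciones especiales
--     replacements = {
--         '<C-': '<Ctrl-',
--         '<M-': '<Alt-',
--         '<S-': '<Shift-',
--         '<CR>': 'Enter',
--         '<Esc>': 'Escape',
--         '<Tab>': 'Tab',
--         '<Space>': 'Espacio'
--     }
--
--     formatted = key
--     for old, new in replacements.items():
--         formatted = formatted.replace(old, new)
--
--     # Envolver en tags kbd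
--     if '<' in formatted and '>' in formatted:
--         # Para combinaciones complejas como <Ctrl-d>
--         formatted = f"<kbd>{formatted}</kbd>"
--     else:
--         # Para teclas simples, envolver cada carácter
--         if len(formatted) == 1:
--             formatted = f"<kbd>{formatted}</kbd>"
--         else:
--             formatted = f"<kbd>{formatted}</kbd>"
--
--     return formatted
-- ===== SOURCE B (Python) =====
-- def format_key_combination(key: str) -> str:
--     """Formatea las combinaciones de teclas para mostrar."""
--     # One left-to-right pass: at each position try each notation in order,
--     # emit its display text and skip it, otherwise copy the character.
--     reps = [
--         ('<C-', '<Ctrl-'),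
--         ('<M-', '<Alt-'),
--         ('<S-', '<Shift-'),
--         ('<CR>', 'Enter'),
--         ('<Esc>', 'Escape'),
--         ('<Tab>', 'Tab'),
--         ('<Space>', 'Espacio'),
--     ]
--     out = []
--     i = 0
--     n = len(key)
--     while i < n:
--         for old, new in reps:
--             if key.startswith(old, i):
--                 out.append(new)
--                 i += len(old)
--                 break
--         else:
--             out.append(key[i])
--             i += 1
--     return "<kbd>" + "".join(out) + "</kbd>"
-- ===== Notes on version B (the rewrite author's own statement) =====
-- stated objective: alternative
-- what changed: A runs seven sequential str.replace passes over the string; B makes a single left-to-right scan that at each position matches one of the seven notations (first match wins) and emits its replacement, then wraps unconditionally in <kbd>…</kbd> since all of A's branches wrap identically.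
import Mathlib
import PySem

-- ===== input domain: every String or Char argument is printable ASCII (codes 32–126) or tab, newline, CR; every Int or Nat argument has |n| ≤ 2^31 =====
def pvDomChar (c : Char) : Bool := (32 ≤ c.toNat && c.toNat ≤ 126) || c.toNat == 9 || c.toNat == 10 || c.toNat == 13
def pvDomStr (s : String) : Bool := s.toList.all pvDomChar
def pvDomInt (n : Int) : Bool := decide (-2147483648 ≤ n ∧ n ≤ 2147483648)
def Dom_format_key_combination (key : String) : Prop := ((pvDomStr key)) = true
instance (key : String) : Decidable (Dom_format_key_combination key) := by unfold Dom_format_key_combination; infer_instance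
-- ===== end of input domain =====

-- B replaces A's seven sequential str.replace passes by ONE left-to-right scan that at each
-- position emits the display text of the first matching notation; the <kbd> wrap is done
-- unconditionally since all of A's branches wrap identically (objective: alternative).

-- ===== PORT A =====
def format_key_combination (key : String) : String :=
  let f1 := PySem.Str.replace key "<C-" "<Ctrl-"
  let f2 := PySem.Str.replace f1 "<M-" "<Alt-"
  let f3 := PySem.Str.replace f2 "<S-" "<Shift-"
  let f4 := PySem.Str.replace f3 "<CR>" "Enter"
  let f5 := PySem.Str.replace f4 "<Esc>" "Escape"
  let f6 := PySem.Str.replace f5 "<Tab>" "Tab"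
  let f7 := PySem.Str.replace f6 "<Space>" "Espacio"
  if PySem.Str.isIn "<" f7 && PySem.Str.isIn ">" f7 then
    "<kbd>" ++ f7 ++ "</kbd>"
  else
    if PySem.Str.len f7 = 1 then
      "<kbd>" ++ f7 ++ "</kbd>"
    else
      "<kbd>" ++ f7 ++ "</kbd>"

-- ===== PORT B =====
-- the (notation, display) table of Source B, as char lists
def pvReps : List (List Char × List Char) :=
  [ (['<','C','-'], ['<','C','t','r','l','-'])
  , (['<','M','-'], ['<','A','l','t','-'])
  , (['<','S','-'], ['<','S','h','i','f','t','-'])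
  , (['<','C','R','>'], ['E','n','t','e','r'])
  , (['<','E','s','c','>'], ['E','s','c','a','p','e'])
  , (['<','T','a','b','>'], ['T','a','b'])
  , (['<','S','p','a','c','e','>'], ['E','s','p','a','c','i','o']) ]

-- Source B's while-loop: one pass, first matching key wins (the `k = []` guard only makes the
-- recursion total; every key in pvReps is nonempty)
def pvOnePass (ps : List (List Char × List Char)) : List Char → List Char
  | [] => []
  | c :: t =>
    match ps.find? (fun p => p.1.isPrefixOf (c :: t)) with
    | some (k, r) =>
      if h : k = [] then c :: pvOnePass ps t
      else r ++ pvOnePass ps ((c :: t).drop k.length)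
    | none => c :: pvOnePass ps t
termination_by s => s.length
decreasing_by
  all_goals simp only [List.length_cons, List.length_drop]
  all_goals try omega
  all_goals (cases k with
    | nil => exact absurd rfl h
    | cons a l => simp only [List.length_cons]; omega)

def format_key_combination_alt (key : String) : String :=
  "<kbd>" ++ String.ofList (pvOnePass pvReps key.toList) ++ "</kbd>"

-- ===== PRECONDITION & SPEC =====
def Spec_format_key_combination (key : String) (out : String) : Prop := out = format_key_combination_alt key
instance (key : String) (out : String) : Decidable (Spec_format_key_combination key out) := by unfold Spec_format_key_combination; infer_instance

-- ===== CLAIM (what is proved, stated in full; the proofs are below) =====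
def Claim_equal_format_key_combination : Prop := ∀ (key : String), Dom_format_key_combination key → Spec_format_key_combination key (format_key_combination key)

-- ===== LEMMAS AND PROOFS =====

theorem pvStrExt (s t : String) (h : s.toList = t.toList) : s = t :=
  String.toList_inj.mp h

theorem pvNotPrefixOf (a b : List Char) (h : ¬ a <+: b) : a.isPrefixOf b = false :=
  Bool.eq_false_iff.mpr (fun hb => h (List.isPrefixOf_iff_prefix.mp hb))

-- Python's str.replace as the obvious recursion (A-side characterisation of Chars.replace)
def pvRep1 (old new : List Char) : List Char → List Char
  | [] => []
  | c :: t =>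
    if h : old ≠ [] ∧ old <+: (c :: t) then
      new ++ pvRep1 old new ((c :: t).drop old.length)
    else
      c :: pvRep1 old new t
termination_by s => s.length
decreasing_by
  · have hk : 0 < old.length := by cases hol : old with
      | nil => exact absurd hol h.1
      | cons a l => simp
    simp
    omega
  · simp

theorem pvRep1_nil (o n : List Char) : pvRep1 o n [] = [] := by simp [pvRep1]

theorem pvRep1_pos (o n : List Char) (c : Char) (t : List Char)
    (ho : o ≠ []) (hp : o <+: (c :: t)) :
    pvRep1 o n (c :: t) = n ++ pvRep1 o n ((c :: t).drop o.length) := by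
  rw [pvRep1]
  simp [ho, hp]

theorem pvRep1_neg (o n : List Char) (c : Char) (t : List Char)
    (h : ¬ (o ≠ [] ∧ o <+: (c :: t))) :
    pvRep1 o n (c :: t) = c :: pvRep1 o n t := by
  rw [pvRep1]
  simp only [dif_neg h]

theorem pvGoSpec (o n : List Char) (ho : o ≠ []) :
    ∀ (fuel : Nat) (l acc : List Char), l.length ≤ fuel →
      PySem.Chars.replace.go o n fuel l acc = acc.reverse ++ pvRep1 o n l := by
  intro fuel
  induction fuel with
  | zero =>
    intro l acc h
    have hl : l = [] := List.eq_nil_of_length_eq_zero (Nat.le_zero.mp h)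
    subst hl
    simp [PySem.Chars.replace.go, pvRep1_nil]
  | succ f ih =>
    intro l acc h
    cases l with
    | nil => simp [PySem.Chars.replace.go, pvRep1_nil]
    | cons c t =>
      by_cases hp : o <+: (c :: t)
      · have hb : o.isPrefixOf (c :: t) = true := List.isPrefixOf_iff_prefix.mpr hp
        have hlen : ((c :: t).drop o.length).length ≤ f := by
          have : 0 < o.length := List.length_pos_iff.mpr ho
          simp at h ⊢
          omega
        rw [show PySem.Chars.replace.go o n (f+1) (c :: t) acc
              = PySem.Chars.replace.go o n f ((c :: t).drop o.length) (n.reverse ++ acc) by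
            simp [PySem.Chars.replace.go, hb]]
        rw [ih _ _ hlen, pvRep1_pos o n c t ho hp]
        simp
      · have hb : o.isPrefixOf (c :: t) = false := pvNotPrefixOf _ _ hp
        have hlen : t.length ≤ f := by simp at h; omega
        rw [show PySem.Chars.replace.go o n (f+1) (c :: t) acc
              = PySem.Chars.replace.go o n f t (c :: acc) by
            simp [PySem.Chars.replace.go, hb]]
        rw [ih _ _ hlen, pvRep1_neg o n c t (fun hh => hp hh.2)]
        simp

theorem pvReplaceEq (s o n : List Char) (ho : o ≠ []) :
    PySem.Chars.replace s o n = pvRep1 o n s := by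
  unfold PySem.Chars.replace
  rw [if_neg (by simp [ho])]
  simpa using pvGoSpec o n ho s.length s [] le_rfl

-- unfolding lemmas for pvOnePass
theorem pvOnePass_nil (ps : List (List Char × List Char)) : pvOnePass ps [] = [] := by
  rw [pvOnePass.eq_def]

theorem pvOnePass_none (ps : List (List Char × List Char)) (c : Char) (t : List Char)
    (h : ps.find? (fun p => p.1.isPrefixOf (c :: t)) = none) :
    pvOnePass ps (c :: t) = c :: pvOnePass ps t := by
  rw [pvOnePass.eq_def]
  simp [h]

theorem pvOnePass_match (ps : List (List Char × List Char)) (s : List Char) (hs : s ≠ [])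
    (k r : List Char) (hfind : ps.find? (fun p => p.1.isPrefixOf s) = some (k, r))
    (hk : k ≠ []) :
    pvOnePass ps s = r ++ pvOnePass ps (s.drop k.length) := by
  cases s with
  | nil => exact absurd rfl hs
  | cons c t =>
    rw [pvOnePass.eq_def]
    simp [hfind, hk]

-- "k never matches at any position inside u, whatever follows" — decidable form + its meaning
abbrev pvC (k u : List Char) : Prop :=
  ∀ i < u.length, ∃ j < k.length, i + j < u.length ∧ u[i+j]? ≠ k[j]?

theorem pvC_spec (k u : List Char) (h : pvC k u) :
    ∀ (x : List Char), ∀ i < u.length, ¬ k <+: (u ++ x).drop i := by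
  intro x i hi hp
  obtain ⟨j, hj, hij, hne⟩ := h i hi
  apply hne
  obtain ⟨z, hz⟩ := hp
  have h1 : (u ++ x)[i+j]? = k[j]? := by
    rw [← List.getElem?_drop, ← hz, List.getElem?_append_left hj]
  rw [List.getElem?_append_left hij] at h1
  exact h1

-- "km cannot start strictly inside km and continue into the replacement text r" — decidable form
abbrev pvE (km r : List Char) : Prop :=
  ∀ p < km.length, 1 ≤ p → ∃ j < r.length, p + j < km.length ∧ km[p+j]? ≠ r[j]?

theorem pvRep1_append (k r u : List Char)
    (h : ∀ (x : List Char), ∀ i < u.length, ¬ k <+: (u ++ x).drop i) :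
    ∀ t, pvRep1 k r (u ++ t) = u ++ pvRep1 k r t := by
  induction u with
  | nil => intro t; simp
  | cons c u' ih =>
    intro t
    have hhead : ¬ k <+: (c :: (u' ++ t)) := by
      have := h t 0 (by simp)
      simpa using this
    have ih' : ∀ (x : List Char), ∀ i < u'.length, ¬ k <+: (u' ++ x).drop i := by
      intro x i hi
      have := h x (i+1) (by simp; omega)
      simpa using this
    calc pvRep1 k r ((c :: u') ++ t) = pvRep1 k r (c :: (u' ++ t)) := rfl
    _ = c :: pvRep1 k r (u' ++ t) := pvRep1_neg _ _ _ _ (fun hh => hhead hh.2)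
    _ = c :: (u' ++ pvRep1 k r t) := by rw [ih ih' t]
    _ = (c :: u') ++ pvRep1 k r t := rfl

theorem pvOnePass_append (ps : List (List Char × List Char)) (u : List Char)
    (h : ∀ p ∈ ps, ∀ (x : List Char), ∀ i < u.length, ¬ p.1 <+: (u ++ x).drop i) :
    ∀ t, pvOnePass ps (u ++ t) = u ++ pvOnePass ps t := by
  induction u with
  | nil => intro t; simp
  | cons c u' ih =>
    intro t
    have hnone : ps.find? (fun p => p.1.isPrefixOf (c :: (u' ++ t))) = none := by
      rw [List.find?_eq_none]
      intro p hp
      have := h p hp t 0 (by simp)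
      simp only [List.isPrefixOf_iff_prefix]
      simpa using this
    have ih' : ∀ p ∈ ps, ∀ (x : List Char), ∀ i < u'.length, ¬ p.1 <+: (u' ++ x).drop i := by
      intro p hp x i hi
      have := h p hp x (i+1) (by simp; omega)
      simpa using this
    calc pvOnePass ps ((c :: u') ++ t) = pvOnePass ps (c :: (u' ++ t)) := rfl
    _ = c :: pvOnePass ps (u' ++ t) := pvOnePass_none _ _ _ hnone
    _ = c :: (u' ++ pvOnePass ps t) := by rw [ih ih' t]
    _ = (c :: u') ++ pvOnePass ps t := rfl

theorem pvFindCongr {α : Type} (f g : α → Bool) :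
    ∀ (l : List α), (∀ a ∈ l, f a = g a) → l.find? f = l.find? g := by
  intro l
  induction l with
  | nil => intro _; rfl
  | cons a l ih =>
    intro h
    simp only [List.find?_cons]
    rw [h a (by simp)]
    by_cases hg : g a = true
    · simp [hg]
    · simp only [Bool.not_eq_true] at hg
      simp [hg]
      exact ih (fun b hb => h b (by simp [hb]))

theorem pvDecomp (k r : List Char) (hk : k ≠ []) :
    ∀ (m : Nat) (t : List Char), t.length ≤ m →
      pvRep1 k r t = t ∨
      ∃ u v, t = u ++ k ++ v ∧ pvRep1 k r t = u ++ r ++ pvRep1 k r v := by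
  intro m
  induction m with
  | zero =>
    intro t ht
    have : t = [] := List.eq_nil_of_length_eq_zero (Nat.le_zero.mp ht)
    subst this
    left
    exact pvRep1_nil _ _
  | succ m ih =>
    intro t ht
    cases t with
    | nil => left; exact pvRep1_nil _ _
    | cons c t' =>
      by_cases hpre : k <+: (c :: t')
      · right
        obtain ⟨v, hv⟩ := hpre
        refine ⟨[], v, by simp [← hv], ?_⟩
        rw [pvRep1_pos k r c t' hk ⟨v, hv⟩]
        simp [← hv, List.drop_left]
      · have hneg : ¬ (k ≠ [] ∧ k <+: (c :: t')) := fun hh => hpre hh.2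
        rcases ih t' (by simp at ht; omega) with heq | ⟨u, v, h1, h2⟩
        · left; rw [pvRep1_neg _ _ _ _ hneg, heq]
        · right
          exact ⟨c :: u, v, by simp [h1], by rw [pvRep1_neg _ _ _ _ hneg, h2]; simp⟩

theorem pvNP (k r km : List Char) (hk : k ≠ []) (hE : pvE km r) (c : Char) (t : List Char)
    (h : ¬ km <+: (c :: t)) : ¬ km <+: (c :: pvRep1 k r t) := by
  intro hp
  rcases pvDecomp k r hk t.length t le_rfl with heq | ⟨u, v, htu, hru⟩
  · rw [heq] at hp; exact h hp
  · rw [hru] at hp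
    have hp' : km <+: (c :: u) ++ (r ++ pvRep1 k r v) := by simpa using hp
    by_cases hlen : km.length ≤ (c :: u).length
    · apply h
      have h1 : km <+: (c :: u) := by
        have h2 := List.prefix_iff_eq_take.mp hp'
        rw [List.take_append_of_le_length hlen] at h2
        exact h2 ▸ List.take_prefix _ _
      have h3 : (c :: t) = (c :: u) ++ (k ++ v) := by simp [htu]
      rw [h3]
      exact h1.trans (List.prefix_append _ _)
    · push_neg at hlen
      have hp1 : 1 ≤ (c :: u).length := by simp
      obtain ⟨j, hj, hpj, hne⟩ := hE (c :: u).length hlen hp1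
      apply hne
      obtain ⟨z, hz⟩ := hp'
      have e1 : km[(c :: u).length + j]? = ((c :: u) ++ (r ++ pvRep1 k r v))[(c :: u).length + j]? := by
        rw [← hz, List.getElem?_append_left hpj]
      rw [List.getElem?_append_right (by omega)] at e1
      simp only [Nat.add_sub_cancel_left] at e1
      rw [List.getElem?_append_left hj] at e1
      exact e1

theorem pvBase (k r : List Char) (hk : k ≠ []) :
    ∀ (m : Nat) (s : List Char), s.length ≤ m → pvOnePass [(k, r)] s = pvRep1 k r s := by
  intro m
  induction m with
  | zero =>
    intro s hs
    have : s = [] := List.eq_nil_of_length_eq_zero (Nat.le_zero.mp hs)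
    subst this
    rw [pvOnePass_nil, pvRep1_nil]
  | succ m ih =>
    intro s hs
    cases s with
    | nil => rw [pvOnePass_nil, pvRep1_nil]
    | cons c t =>
      by_cases hpre : k <+: (c :: t)
      · have hfind : [(k, r)].find? (fun p => p.1.isPrefixOf (c :: t)) = some (k, r) := by
          simp [List.find?_cons, List.isPrefixOf_iff_prefix, hpre]
        rw [pvOnePass_match _ _ (by simp) k r hfind hk, pvRep1_pos k r c t hk hpre]
        congr 1
        apply ih
        have : 0 < k.length := List.length_pos_iff.mpr hk
        simp at hs ⊢
        omega
      · have hfind : [(k, r)].find? (fun p => p.1.isPrefixOf (c :: t)) = none := by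
          simp [List.find?_cons, List.isPrefixOf_iff_prefix, hpre]
        rw [pvOnePass_none _ _ _ hfind, pvRep1_neg _ _ _ _ (fun hh => hpre hh.2)]
        rw [ih t (by simp at hs; omega)]

theorem pvStep (k r : List Char) (ps : List (List Char × List Char)) (hk : k ≠ [])
    (hne : ∀ p ∈ ps, p.1 ≠ [])
    (hCr : ∀ p ∈ ps, pvC p.1 r)
    (hCk : ∀ p ∈ ps, pvC k p.1)
    (hE : ∀ p ∈ ps, pvE p.1 r)
    (hCpair : ∀ p ∈ ps, ∀ q ∈ ps, p.1 ≠ q.1 → pvC p.1 q.1) :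
    ∀ (m : Nat) (s : List Char), s.length ≤ m →
      pvOnePass ps (pvRep1 k r s) = pvOnePass ((k, r) :: ps) s := by
  intro m
  induction m with
  | zero =>
    intro s hs
    have : s = [] := List.eq_nil_of_length_eq_zero (Nat.le_zero.mp hs)
    subst this
    rw [pvRep1_nil, pvOnePass_nil, pvOnePass_nil]
  | succ m ih =>
    intro s hs
    cases s with
    | nil => rw [pvRep1_nil, pvOnePass_nil, pvOnePass_nil]
    | cons c t =>
      by_cases hKpre : k <+: (c :: t)
      · -- the new key matches first
        obtain ⟨v, hv⟩ := hKpre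
        have hdrop : (c :: t).drop k.length = v := by rw [← hv, List.drop_left]
        have hlenv : v.length ≤ m := by
          have h0 : 0 < k.length := List.length_pos_iff.mpr hk
          have := congrArg List.length hv
          simp at this hs
          omega
        rw [pvRep1_pos k r c t hk ⟨v, hv⟩, hdrop]
        rw [pvOnePass_append ps r (fun p hp => pvC_spec p.1 r (hCr p hp)) (pvRep1 k r v)]
        rw [ih v hlenv]
        have hfind : ((k, r) :: ps).find? (fun p => p.1.isPrefixOf (c :: t)) = some (k, r) := by
          have hb : k.isPrefixOf (c :: t) = true := List.isPrefixOf_iff_prefix.mpr ⟨v, hv⟩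
          simp [List.find?_cons, hb]
        rw [pvOnePass_match _ _ (by simp) k r hfind hk, hdrop]
      · by_cases hfq : ∃ p, ps.find? (fun pp => pp.1.isPrefixOf (c :: t)) = some p
        · -- some old key matches first
          obtain ⟨⟨kj, rj⟩, hfind⟩ := hfq
          have hmem : (kj, rj) ∈ ps := List.mem_of_find?_eq_some hfind
          have hkj : kj ≠ [] := hne _ hmem
          have hpre : kj <+: (c :: t) := by
            have := List.find?_some hfind
            simpa [List.isPrefixOf_iff_prefix] using this
          obtain ⟨v, hv⟩ := hpre
          have hdrop : (c :: t).drop kj.length = v := by rw [← hv, List.drop_left]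
          have hlenv : v.length ≤ m := by
            have h0 : 0 < kj.length := List.length_pos_iff.mpr hkj
            have := congrArg List.length hv
            simp at this hs
            omega
          -- rep1 passes over kj untouched
          have hrep : pvRep1 k r (c :: t) = kj ++ pvRep1 k r v := by
            rw [← hv]
            exact pvRep1_append k r kj (pvC_spec k kj (hCk _ hmem)) v
          -- in kj ++ X, kj is still the first match, for any X
          have hsame : ∀ (X : List Char),
              ps.find? (fun pp => pp.1.isPrefixOf (kj ++ X)) = some (kj, rj) := by
            intro X
            have hcg : ∀ p ∈ ps, (p.1.isPrefixOf (kj ++ X)) = (p.1.isPrefixOf (kj ++ v)) := by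
              intro p hp
              by_cases hpq : p.1 = kj
              · rw [hpq,
                    List.isPrefixOf_iff_prefix.mpr (List.prefix_append _ _),
                    List.isPrefixOf_iff_prefix.mpr (List.prefix_append _ _)]
              · have hC := pvC_spec p.1 kj (hCpair p hp (kj, rj) hmem hpq)
                have h1 := hC X 0 (by simpa using List.length_pos_iff.mpr hkj)
                have h2 := hC v 0 (by simpa using List.length_pos_iff.mpr hkj)
                simp only [List.drop_zero] at h1 h2
                rw [pvNotPrefixOf _ _ h1, pvNotPrefixOf _ _ h2]
            rw [pvFindCongr _ _ ps hcg, hv, hfind]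
          have hne1 : kj ++ pvRep1 k r v ≠ [] := by
            cases kj with
            | nil => exact absurd rfl hkj
            | cons a l => simp
          rw [hrep, pvOnePass_match ps _ hne1 kj rj (hsame _) hkj, List.drop_left]
          rw [ih v hlenv]
          have hknot : k.isPrefixOf (c :: t) = false := pvNotPrefixOf _ _ hKpre
          have hfind2 : ((k, r) :: ps).find? (fun pp => pp.1.isPrefixOf (c :: t)) = some (kj, rj) := by
            rw [List.find?_cons]
            simp only [hknot]
            exact hfind
          rw [pvOnePass_match _ _ (by simp) kj rj hfind2 hkj, hdrop]
        · -- no key matches at this position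
          push_neg at hfq
          have hfnone : ps.find? (fun pp => pp.1.isPrefixOf (c :: t)) = none := by
            cases hcase : ps.find? (fun pp => pp.1.isPrefixOf (c :: t)) with
            | none => rfl
            | some p => exact absurd hcase (hfq p)
          have hnomatch : ∀ p ∈ ps, ¬ p.1 <+: (c :: t) := by
            intro p hp
            have := List.find?_eq_none.mp hfnone p hp
            simpa [List.isPrefixOf_iff_prefix] using this
          rw [pvRep1_neg _ _ _ _ (fun hh => hKpre hh.2)]
          have hfnone2 : ps.find? (fun pp => pp.1.isPrefixOf (c :: pvRep1 k r t)) = none := by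
            rw [List.find?_eq_none]
            intro p hp
            have := pvNP k r p.1 hk (hE p hp) c t (hnomatch p hp)
            simpa [List.isPrefixOf_iff_prefix] using this
          rw [pvOnePass_none _ _ _ hfnone2, ih t (by simp at hs; omega)]
          have hknot : k.isPrefixOf (c :: t) = false := pvNotPrefixOf _ _ hKpre
          have hfcons : ((k, r) :: ps).find? (fun pp => pp.1.isPrefixOf (c :: t)) = none := by
            rw [List.find?_cons]
            simp only [hknot]
            exact hfnone
          rw [pvOnePass_none _ _ _ hfcons]

theorem pvChain (cs : List Char) :
    PySem.Chars.replace (PySem.Chars.replace (PySem.Chars.replace (PySem.Chars.replace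
      (PySem.Chars.replace (PySem.Chars.replace (PySem.Chars.replace cs
        ['<','C','-'] ['<','C','t','r','l','-'])
        ['<','M','-'] ['<','A','l','t','-'])
        ['<','S','-'] ['<','S','h','i','f','t','-'])
        ['<','C','R','>'] ['E','n','t','e','r'])
        ['<','E','s','c','>'] ['E','s','c','a','p','e'])
        ['<','T','a','b','>'] ['T','a','b'])
        ['<','S','p','a','c','e','>'] ['E','s','p','a','c','i','o']
    = pvOnePass pvReps cs := by
  rw [pvReplaceEq _ _ _ (by decide), pvReplaceEq _ _ _ (by decide),
      pvReplaceEq _ _ _ (by decide), pvReplaceEq _ _ _ (by decide),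
      pvReplaceEq _ _ _ (by decide), pvReplaceEq _ _ _ (by decide),
      pvReplaceEq _ _ _ (by decide)]
  rw [← pvBase ['<','S','p','a','c','e','>'] ['E','s','p','a','c','i','o'] (by decide) _ _ le_rfl]
  rw [pvStep ['<','T','a','b','>'] ['T','a','b']
        [(['<','S','p','a','c','e','>'], ['E','s','p','a','c','i','o'])]
        (by decide) (by decide) (by decide) (by decide) (by decide) (by decide) _ _ le_rfl]
  rw [pvStep ['<','E','s','c','>'] ['E','s','c','a','p','e']
        [(['<','T','a','b','>'], ['T','a','b']),
         (['<','S','p','a','c','e','>'], ['E','s','p','a','c','i','o'])]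
        (by decide) (by decide) (by decide) (by decide) (by decide) (by decide) _ _ le_rfl]
  rw [pvStep ['<','C','R','>'] ['E','n','t','e','r']
        [(['<','E','s','c','>'], ['E','s','c','a','p','e']),
         (['<','T','a','b','>'], ['T','a','b']),
         (['<','S','p','a','c','e','>'], ['E','s','p','a','c','i','o'])]
        (by decide) (by decide) (by decide) (by decide) (by decide) (by decide) _ _ le_rfl]
  rw [pvStep ['<','S','-'] ['<','S','h','i','f','t','-']
        [(['<','C','R','>'], ['E','n','t','e','r']),
         (['<','E','s','c','>'], ['E','s','c','a','p','e']),
         (['<','T','a','b','>'], ['T','a','b']),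
         (['<','S','p','a','c','e','>'], ['E','s','p','a','c','i','o'])]
        (by decide) (by decide) (by decide) (by decide) (by decide) (by decide) _ _ le_rfl]
  rw [pvStep ['<','M','-'] ['<','A','l','t','-']
        [(['<','S','-'], ['<','S','h','i','f','t','-']),
         (['<','C','R','>'], ['E','n','t','e','r']),
         (['<','E','s','c','>'], ['E','s','c','a','p','e']),
         (['<','T','a','b','>'], ['T','a','b']),
         (['<','S','p','a','c','e','>'], ['E','s','p','a','c','i','o'])]
        (by decide) (by decide) (by decide) (by decide) (by decide) (by decide) _ _ le_rfl]
  rw [pvStep ['<','C','-'] ['<','C','t','r','l','-']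
        [(['<','M','-'], ['<','A','l','t','-']),
         (['<','S','-'], ['<','S','h','i','f','t','-']),
         (['<','C','R','>'], ['E','n','t','e','r']),
         (['<','E','s','c','>'], ['E','s','c','a','p','e']),
         (['<','T','a','b','>'], ['T','a','b']),
         (['<','S','p','a','c','e','>'], ['E','s','p','a','c','i','o'])]
        (by decide) (by decide) (by decide) (by decide) (by decide) (by decide) _ _ le_rfl]
  rfl

-- ===== VERDICT (by name: the statement is the Claim_ definition above) =====
theorem format_key_combination_spec : Claim_equal_format_key_combination := by
  intro key _
  unfold Spec_format_key_combination format_key_combination format_key_combination_alt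
  have hmid :
      PySem.Str.replace (PySem.Str.replace (PySem.Str.replace (PySem.Str.replace
        (PySem.Str.replace (PySem.Str.replace (PySem.Str.replace key
          "<C-" "<Ctrl-") "<M-" "<Alt-") "<S-" "<Shift-") "<CR>" "Enter")
          "<Esc>" "Escape") "<Tab>" "Tab") "<Space>" "Espacio"
      = String.ofList (pvOnePass pvReps key.toList) := by
    apply pvStrExt
    simp only [PySem.Str.toList_replace]
    have h1 : ("<C-" : String).toList = ['<','C','-'] := by decide
    have h2 : ("<Ctrl-" : String).toList = ['<','C','t','r','l','-'] := by decide
    have h3 : ("<M-" : String).toList = ['<','M','-'] := by decide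
    have h4 : ("<Alt-" : String).toList = ['<','A','l','t','-'] := by decide
    have h5 : ("<S-" : String).toList = ['<','S','-'] := by decide
    have h6 : ("<Shift-" : String).toList = ['<','S','h','i','f','t','-'] := by decide
    have h7 : ("<CR>" : String).toList = ['<','C','R','>'] := by decide
    have h8 : ("Enter" : String).toList = ['E','n','t','e','r'] := by decide
    have h9 : ("<Esc>" : String).toList = ['<','E','s','c','>'] := by decide
    have h10 : ("Escape" : String).toList = ['E','s','c','a','p','e'] := by decide
    have h11 : ("<Tab>" : String).toList = ['<','T','a','b','>'] := by decide
    have h12 : ("Tab" : String).toList = ['T','a','b'] := by decide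
    have h13 : ("<Space>" : String).toList = ['<','S','p','a','c','e','>'] := by decide
    have h14 : ("Espacio" : String).toList = ['E','s','p','a','c','i','o'] := by decide
    rw [h1, h2, h3, h4, h5, h6, h7, h8, h9, h10, h11, h12, h13, h14]
    have h15 : (String.ofList (pvOnePass pvReps key.toList)).toList
        = pvOnePass pvReps key.toList := String.toList_ofList
    rw [h15]
    exact pvChain key.toList
  show (if (PySem.Str.isIn "<" (PySem.Str.replace (PySem.Str.replace (PySem.Str.replace (PySem.Str.replace (PySem.Str.replace (PySem.Str.replace (PySem.Str.replace key "<C-" "<Ctrl-") "<M-" "<Alt-") "<S-" "<Shift-") "<CR>" "Enter") "<Esc>" "Escape") "<Tab>" "Tab") "<Space>" "Espacio") && PySem.Str.isIn ">" (PySem.Str.replace (PySem.Str.replace (PySem.Str.replace (PySem.Str.replace (PySem.Str.replace (PySem.Str.replace (PySem.Str.replace key "<C-" "<Ctrl-") "<M-" "<Alt-") "<S-" "<Shift-") "<CR>" "Enter") "<Esc>" "Escape") "<Tab>" "Tab") "<Space>" "Espacio")) = true then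
      "<kbd>" ++ (PySem.Str.replace (PySem.Str.replace (PySem.Str.replace (PySem.Str.replace (PySem.Str.replace (PySem.Str.replace (PySem.Str.replace key "<C-" "<Ctrl-") "<M-" "<Alt-") "<S-" "<Shift-") "<CR>" "Enter") "<Esc>" "Escape") "<Tab>" "Tab") "<Space>" "Espacio") ++ "</kbd>"
    else if PySem.Str.len (PySem.Str.replace (PySem.Str.replace (PySem.Str.replace (PySem.Str.replace (PySem.Str.replace (PySem.Str.replace (PySem.Str.replace key "<C-" "<Ctrl-") "<M-" "<Alt-") "<S-" "<Shift-") "<CR>" "Enter") "<Esc>" "Escape") "<Tab>" "Tab") "<Space>" "Espacio") = 1 then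
      "<kbd>" ++ (PySem.Str.replace (PySem.Str.replace (PySem.Str.replace (PySem.Str.replace (PySem.Str.replace (PySem.Str.replace (PySem.Str.replace key "<C-" "<Ctrl-") "<M-" "<Alt-") "<S-" "<Shift-") "<CR>" "Enter") "<Esc>" "Escape") "<Tab>" "Tab") "<Space>" "Espacio") ++ "</kbd>"
    else
      "<kbd>" ++ (PySem.Str.replace (PySem.Str.replace (PySem.Str.replace (PySem.Str.replace (PySem.Str.replace (PySem.Str.replace (PySem.Str.replace key "<C-" "<Ctrl-") "<M-" "<Alt-") "<S-" "<Shift-") "<CR>" "Enter") "<Esc>" "Escape") "<Tab>" "Tab") "<Space>" "Espacio") ++ "</kbd>")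
    = "<kbd>" ++ String.ofList (pvOnePass pvReps key.toList) ++ "</kbd>"
  rw [hmid]
  simp only [ite_self]
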